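-- pv_equiv track=rewrite | github.com/KayleighWasTaken/codewars | solutions/py/4 kyu/CatchingCarMilageNumbers.py | is_interesting
-- ===== SOURCE A (Python) =====
-- def is_interesting(number, awesome_phrases):
--     for i in range(3):
--         if (num_str_len := len(num_str := str(number + i))) > 2:
--             if number + i in awesome_phrases:
--                 return 1 if i else 2
--             if not (number + i) % (10 ** (num_str_len - 1)):
--                 return 1 if i else 2
--             if len(set(num_str)) == 1:
--                 return 1 if i else 2
--             if all([*range(1, 10), 0].index(int(x)) - [*range(1, 10), 0].index(int(num_str[p + 1])) == -1 for p, x in enumerate(num_str[:-1])):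
--                 return 1 if i else 2
--             if all([*range(9, -1, -1)].index(int(x)) - [*range(9, -1, -1)].index(int(num_str[p + 1])) == -1 for p, x in enumerate(num_str[:-1])):
--                 return 1 if i else 2
--             if num_str[:num_str_len // 2][::-1] == num_str[-(num_str_len // 2):]:
--                 return 1 if i else 2
--     return 0
-- ===== SOURCE B (Python) =====
-- def is_interesting(number, awesome_phrases):
--     def interesting(n):
--         s = str(n)
--         if len(s) <= 2:
--             return False
--         return (n in awesome_phrases
--                 or n % 10 ** (len(s) - 1) == 0
--                 or len(set(s)) == 1
--                 or s in "1234567890"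
--                 or s in "9876543210"
--                 or s == s[::-1])
--     if interesting(number):
--         return 2
--     if interesting(number + 1) or interesting(number + 2):
--         return 1
--     return 0
-- ===== Notes on version B (the rewrite author's own statement) =====
-- stated objective: idiomatic
-- what changed: A detects incrementing/decrementing digit runs by pairwise index arithmetic over permuted digit lists and palindromes by comparing reversed half-slices inside one nested loop body; B extracts an interesting(n) predicate and tests runs by substring membership in the fixed strings '1234567890'/'9876543210' and palindromes by s == s[::-1], with an if-chain instead of the range(3) loop.
import Mathlib
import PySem

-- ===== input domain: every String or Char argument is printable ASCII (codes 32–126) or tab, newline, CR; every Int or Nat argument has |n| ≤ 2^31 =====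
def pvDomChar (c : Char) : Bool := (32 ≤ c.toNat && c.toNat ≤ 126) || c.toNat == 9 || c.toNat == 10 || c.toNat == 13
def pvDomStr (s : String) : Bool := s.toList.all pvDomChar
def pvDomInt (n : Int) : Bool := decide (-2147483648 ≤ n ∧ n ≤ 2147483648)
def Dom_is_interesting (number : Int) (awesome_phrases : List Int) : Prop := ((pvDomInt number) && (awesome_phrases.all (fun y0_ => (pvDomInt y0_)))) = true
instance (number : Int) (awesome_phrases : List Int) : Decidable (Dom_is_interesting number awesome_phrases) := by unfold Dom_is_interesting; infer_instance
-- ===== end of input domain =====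

-- B replaces A's pairwise index-arithmetic run detection with substring membership in fixed
-- digit strings and half-slice palindrome comparison with s == s[::-1] (objective: idiomatic).


-- ===== PORT A =====
-- int(x) for one char; on a non-digit char Python raises ValueError (such inputs are outside Pre_), the getD 0 there is unreachable junk
def pvIntOfChar (c : Char) : Int := (PySem.Int.ofChars? [c]).getD 0
-- [*range(1, 10), 0].index(int(x)); list.index raises only where int(x) already did (outside Pre_)
def pvIdxInc (c : Char) : Int := (PySem.List.index? ((PySem.List.pyRange 1 10 1) ++ [(0 : Int)]) (pvIntOfChar c)).getD 0
-- [*range(9, -1, -1)].index(int(x))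
def pvIdxDec (c : Char) : Int := (PySem.List.index? (PySem.List.pyRange 9 (-1) (-1)) (pvIntOfChar c)).getD 0

-- one iteration of A's `for i in range(3)` body: some r = `return r`, none = fall through
def pvAIter (awesome_phrases : List Int) (number i : Int) : Option Int :=
  let num_str := PySem.Int.toChars (number + i)
  let num_str_len : Int := (num_str.length : Int)
  if 2 < num_str_len then
    if awesome_phrases.contains (number + i) then some (if i != 0 then 1 else 2)
    -- 10 ** (num_str_len - 1): the exponent is nonnegative here (num_str_len > 2), so toNat is exact
    else if PySem.Int.mod (number + i) ((10 : Int) ^ (num_str_len - 1).toNat) == 0 then some (if i != 0 then 1 else 2)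
    else if (PySem.Set.ofList num_str).length == 1 then some (if i != 0 then 1 else 2)
    else if (PySem.List.enumerate (PySem.List.slice num_str none (some (-1))) 0).all
        (fun px => pvIdxInc px.2 - pvIdxInc ((PySem.List.pyGet? num_str (px.1 + 1)).getD ' ') == -1) then some (if i != 0 then 1 else 2)
    else if (PySem.List.enumerate (PySem.List.slice num_str none (some (-1))) 0).all
        (fun px => pvIdxDec px.2 - pvIdxDec ((PySem.List.pyGet? num_str (px.1 + 1)).getD ' ') == -1) then some (if i != 0 then 1 else 2)
    else if ((PySem.List.slice? (PySem.List.slice num_str none (some (PySem.Int.floordiv num_str_len 2))) none none (-1)).getD [])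
        == PySem.List.slice num_str (some (-(PySem.Int.floordiv num_str_len 2))) none then some (if i != 0 then 1 else 2)
    else none
  else none

def is_interesting (number : Int) (awesome_phrases : List Int) : Int :=
  ((PySem.List.pyRange 0 3 1).findSome? (pvAIter awesome_phrases number)).getD 0

-- ===== PORT B =====
-- B's helper predicate interesting(n); strings are ported on the List Char side (PySem.Chars)
def pvInteresting (awesome_phrases : List Int) (n : Int) : Bool :=
  let s := PySem.Int.toChars n
  if (s.length : Int) ≤ 2 then false
  else
    awesome_phrases.contains n
    || (PySem.Int.mod n ((10 : Int) ^ (s.length - 1)) == 0)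
    || ((PySem.Set.ofList s).length == 1)
    || PySem.Chars.isIn s "1234567890".toList
    || PySem.Chars.isIn s "9876543210".toList
    || (s == s.reverse)  -- s == s[::-1]; s[::-1] is List.reverse (PySem.List.slice?_none_none_neg_one)

def is_interesting_alt (number : Int) (awesome_phrases : List Int) : Int :=
  if pvInteresting awesome_phrases number then 2
  else if pvInteresting awesome_phrases (number + 1) || pvInteresting awesome_phrases (number + 2) then 1
  else 0

-- ===== PRECONDITION & SPEC =====
-- Pre_ excludes exactly the inputs where A raises ValueError: for number <= -10 not in
-- awesome_phrases, A reaches int('-') in its digit-run generator at i = 0 and raises.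
def Pre_is_interesting (number : Int) (awesome_phrases : List Int) : Prop :=
  -9 ≤ number ∨ number ∈ awesome_phrases
instance (number : Int) (awesome_phrases : List Int) : Decidable (Pre_is_interesting number awesome_phrases) := by unfold Pre_is_interesting; infer_instance
def pvWitness_is_interesting : Int × List Int := (1233, [])

def Spec_is_interesting (number : Int) (awesome_phrases : List Int) (out : Int) : Prop := out = is_interesting_alt number awesome_phrases
instance (number : Int) (awesome_phrases : List Int) (out : Int) : Decidable (Spec_is_interesting number awesome_phrases out) := by unfold Spec_is_interesting; infer_instance

-- ===== CLAIM (what is proved, stated in full; the proofs are below) =====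
def Claim_equal_is_interesting : Prop := ∀ (number : Int) (awesome_phrases : List Int), Dom_is_interesting number awesome_phrases → Pre_is_interesting number awesome_phrases → Spec_is_interesting number awesome_phrases (is_interesting number awesome_phrases)
-- ===== LEMMAS AND PROOFS =====

lemma pv_digit_mem (m : Nat) : ∀ c ∈ Nat.toDigits 10 m, ∃ k, k < 10 ∧ c = Nat.digitChar k := by
  induction m using Nat.strong_induction_on with
  | _ m ih =>
    intro c hc
    rw [Nat.toDigits_eq_if (by norm_num)] at hc
    split at hc
    · rename_i hm
      simp at hc
      exact ⟨m, hm, hc⟩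
    · rename_i hm
      rcases List.mem_append.mp hc with h | h
      · exact ih (m / 10) (Nat.div_lt_self (by omega) (by norm_num)) c h
      · simp at h
        exact ⟨m % 10, Nat.mod_lt _ (by norm_num), h⟩

lemma pv_len_le_two_iff (m : Nat) : (Nat.toDigits 10 m).length ≤ 2 ↔ m < 100 :=
  Nat.length_toDigits_le_iff (by norm_num) (by norm_num)

lemma pv_len_le_one_iff (m : Nat) : (Nat.toDigits 10 m).length ≤ 1 ↔ m < 10 :=
  Nat.length_toDigits_le_iff (by norm_num) (by norm_num)

-- the ten per-digit facts, decided once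
lemma pv_idxInc_digit : ∀ k, k < 10 → pvIdxInc (Nat.digitChar k) = (List.idxOf (Nat.digitChar k) "1234567890".toList : Int) := by decide
lemma pv_idxDec_digit : ∀ k, k < 10 → pvIdxDec (Nat.digitChar k) = (List.idxOf (Nat.digitChar k) "9876543210".toList : Int) := by decide
lemma pv_digit_mem_strs : ∀ k, k < 10 → Nat.digitChar k ∈ "1234567890".toList ∧ Nat.digitChar k ∈ "9876543210".toList := by decide

-- slices
lemma pv_slice_neg_one {α : Type} (xs : List α) : PySem.List.slice xs none (some (-1)) = xs.take (xs.length - 1) := by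
  simp [PySem.List.slice, PySem.List.clampIdx]
  rcases xs with _ | ⟨a, t⟩ <;> simp

lemma pv_slice_take {α : Type} (xs : List α) (h : Nat) : PySem.List.slice xs none (some (h : Int)) = xs.take h := by
  simp [PySem.List.slice, PySem.List.clampIdx]
  rw [if_neg (by omega)]
  simp

lemma pv_slice_from_neg {α : Type} (xs : List α) (h : Nat) (h0 : 0 < h) (hh : h ≤ xs.length) :
    PySem.List.slice xs (some (-(h : Int))) none = xs.drop (xs.length - h) := by
  simp [PySem.List.slice, PySem.List.clampIdx]
  rw [if_pos h0, if_neg (by omega)]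
  have e : ((xs.length : Int) + -(h : Int)).toNat = xs.length - h := by omega
  rw [e, List.take_of_length_le (by simp)]

-- A's generator `all(... for p, x in enumerate(num_str[:-1]))`, characterised by indices
lemma pv_allA_iff (s : List Char) (f : Char → Int) :
    ((PySem.List.enumerate (PySem.List.slice s none (some (-1))) 0).all
      (fun px => f px.2 - f ((PySem.List.pyGet? s (px.1 + 1)).getD ' ') == -1)) = true
    ↔ ∀ k (h : k + 1 < s.length), f s[k] - f s[k+1] = -1 := by
  rw [pv_slice_neg_one, List.all_eq_true]
  constructor
  · intro H k hk
    have hk' : k < (s.take (s.length - 1)).length := by simp [List.length_take]; omega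
    have hmem : ((0 : Int) + (k : Nat), (s.take (s.length - 1))[k]) ∈ PySem.List.enumerate (s.take (s.length - 1)) 0 :=
      (PySem.List.mem_enumerate_iff _ _ _).mpr ⟨k, hk', rfl⟩
    have := H _ hmem
    simp only [List.getElem_take] at this
    have e1 : (0 : Int) + (k : Nat) + 1 = ((k + 1 : Nat) : Int) := by push_cast; ring
    rw [e1, PySem.List.pyGet?_natCast, List.getElem?_eq_getElem hk] at this
    simpa using this
  · intro H px hpx
    obtain ⟨k, hk, rfl⟩ := (PySem.List.mem_enumerate_iff _ _ _).mp hpx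
    have hk1 : k + 1 < s.length := by simp [List.length_take] at hk; omega
    simp only [List.getElem_take]
    have e1 : (0 : Int) + (k : Nat) + 1 = ((k + 1 : Nat) : Int) := by push_cast; ring
    rw [e1, PySem.List.pyGet?_natCast, List.getElem?_eq_getElem hk1]
    simpa using H k hk1

lemma pv_run_prefix (T : List Char) (s : List Char) :
    ∀ a, a ∈ T → (∀ c ∈ s, c ∈ T) →
    (∀ k (h : k + 1 < (a :: s).length), List.idxOf (a :: s)[k+1] T = List.idxOf (a :: s)[k] T + 1) →
    (a :: s) <+: T.drop (List.idxOf a T) := by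
  induction s with
  | nil =>
    intro a ha _ _
    have hlt : List.idxOf a T < T.length := List.idxOf_lt_length_of_mem ha
    rw [List.drop_eq_getElem_cons hlt, List.getElem_idxOf]
    exact ⟨T.drop (List.idxOf a T + 1), rfl⟩
  | cons b t ih =>
    intro a ha hmem hstep
    have hb : b ∈ T := hmem b (by simp)
    have h0 := hstep 0 (by simp)
    simp at h0
    have hlt : List.idxOf a T < T.length := List.idxOf_lt_length_of_mem ha
    have hpre : (b :: t) <+: T.drop (List.idxOf b T) := by
      apply ih b hb (fun c hc => hmem c (by simp [hc]))
      intro k hk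
      have := hstep (k + 1) (by simp at hk ⊢; omega)
      simpa using this
    rw [List.drop_eq_getElem_cons hlt, List.getElem_idxOf]
    rw [h0] at hpre
    exact (List.cons_prefix_cons).mpr ⟨rfl, hpre⟩

lemma pv_run_iff_infix (T : List Char) (hnd : T.Nodup) (f : Char → Int)
    (s : List Char) (hs : s ≠ []) (hmem : ∀ c ∈ s, c ∈ T)
    (hf : ∀ c ∈ s, f c = (List.idxOf c T : Int)) :
    (∀ k (h : k + 1 < s.length), f s[k] - f s[k+1] = -1) ↔ s <:+: T := by
  constructor
  · intro H
    rcases s with _ | ⟨a, t⟩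
    · exact absurd rfl hs
    · have hstep : ∀ k (h : k + 1 < (a :: t).length), List.idxOf (a :: t)[k+1] T = List.idxOf (a :: t)[k] T + 1 := by
        intro k hk
        have h1 := H k hk
        rw [hf _ (List.getElem_mem _), hf _ (List.getElem_mem _)] at h1
        omega
      have hpre := pv_run_prefix T t a (hmem a (by simp)) (fun c hc => hmem c (by simp [hc])) hstep
      exact hpre.isInfix.trans (List.drop_suffix _ _).isInfix
  · rintro ⟨u, v, huv⟩ k hk
    have hidx : ∀ j (hj : j < s.length), List.idxOf s[j] T = u.length + j := by
      intro j hj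
      subst huv
      have hj' : u.length + j < (u ++ s ++ v).length := by
        simp [List.length_append]; omega
      have he : (u ++ s ++ v)[u.length + j]'hj' = s[j] := by
        rw [List.getElem_append_left (by simp; omega)]
        rw [List.getElem_append_right (by omega)]
        congr 1
        omega
      rw [← he, List.Nodup.idxOf_getElem hnd]
    rw [hf _ (List.getElem_mem _), hf _ (List.getElem_mem _), hidx k (by omega), hidx (k+1) hk]
    push_cast
    ring

lemma pv_getElem_congr {α : Type} (l : List α) (i j : Nat) (hij : i = j) (hi : i < l.length) :
    l[i] = l[j]'(hij ▸ hi) := by subst hij; rfl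

lemma pv_pal_iff (s : List Char) :
    ((s.take (s.length / 2)).reverse = s.drop (s.length - s.length / 2)) ↔ s = s.reverse := by
  constructor
  · intro hhalf
    have hpt : ∀ i (hi : i < s.length / 2),
        s[s.length / 2 - 1 - i]'(by omega) = s[s.length - s.length / 2 + i]'(by omega) := by
      intro i hi
      have hlen : ((s.take (s.length / 2)).reverse).length = s.length / 2 := by
        simp [List.length_take]; omega
      have hi' : i < ((s.take (s.length / 2)).reverse).length := by omega
      have := congrArg (fun l => l[i]?) hhalf
      simp only [List.getElem?_eq_getElem hi'] at this
      rw [List.getElem_reverse] at this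
      rw [List.getElem_take] at this
      have hd : i < (s.drop (s.length - s.length / 2)).length := by simp; omega
      rw [List.getElem?_eq_getElem hd, List.getElem_drop] at this
      have e1 : (s.take (s.length / 2)).length - 1 - i = s.length / 2 - 1 - i := by
        simp [List.length_take]; omega
      simp only [Option.some.injEq] at this
      rw [pv_getElem_congr _ _ _ e1] at this
      exact this
    apply List.ext_getElem (by simp)
    intro j hj hj2
    rw [List.getElem_reverse]
    by_cases hcase : j < s.length / 2
    · have := hpt (s.length / 2 - 1 - j) (by omega)
      rw [pv_getElem_congr _ _ j (by omega)] at this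
      rw [this]
      exact pv_getElem_congr _ _ _ (by omega) _
    · by_cases hcase2 : s.length - s.length / 2 ≤ j
      · have := hpt (j - (s.length - s.length / 2)) (by omega)
        rw [pv_getElem_congr _ (s.length - s.length / 2 + (j - (s.length - s.length / 2))) j (by omega)] at this
        rw [← this]
        exact pv_getElem_congr _ _ _ (by omega) _
      · exact pv_getElem_congr _ _ _ (by omega) _
  · intro hpal
    rw [List.reverse_take, ← hpal]

lemma pv_floordiv_two (L : Nat) : PySem.Int.floordiv ((L : Int)) 2 = ((L / 2 : Nat) : Int) := by
  show (L : Int).fdiv 2 = _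
  rw [Int.fdiv_eq_ediv]
  omega


lemma pv_aIter_eq (aw : List Int) (number i : Int) (h : -9 ≤ number + i) :
    pvAIter aw number i = if pvInteresting aw (number + i) then some (if i != 0 then 1 else 2) else none := by
  unfold pvAIter pvInteresting
  simp only []
  generalize number + i = m at h ⊢
  by_cases hneg : m < 0
  · have habs : m.natAbs < 10 := by omega
    have hchars : PySem.Int.toChars m = '-' :: Nat.toDigits 10 m.natAbs := by
      simp [PySem.Int.toChars, hneg]
    have hlen : (PySem.Int.toChars m).length = 2 := by
      rw [hchars, Nat.toDigits_of_lt_base habs]; rfl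
    simp only [hlen]
    norm_num
  · rw [not_lt] at hneg
    have hchars : PySem.Int.toChars m = Nat.toDigits 10 m.toNat := by
      simp [PySem.Int.toChars]; omega
    by_cases hsmall : m < 100
    · have hlen : (PySem.Int.toChars m).length ≤ 2 := by
        rw [hchars]; exact (pv_len_le_two_iff _).mpr (by omega)
      have h1 : ¬ ((2:Int) < ((PySem.Int.toChars m).length : Int)) := by omega
      have h2 : ((PySem.Int.toChars m).length : Int) ≤ 2 := by omega
      simp only [if_neg h1, if_pos h2, Bool.false_eq_true, if_false]
    · -- m ≥ 100 : the six tests agree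
      set s := PySem.Int.toChars m with hs
      have hlen3 : 3 ≤ s.length := by
        rw [hchars]
        by_contra hc
        have := (pv_len_le_two_iff m.toNat).mp (by omega)
        omega
      have hdig : ∀ c ∈ s, ∃ k, k < 10 ∧ c = Nat.digitChar k := by
        rw [hchars]; exact pv_digit_mem m.toNat
      have hne : s ≠ [] := by intro hc; rw [hc] at hlen3; simp at hlen3
      -- branch 2: exponents agree
      have e2 : ((s.length : Int) - 1).toNat = s.length - 1 := by omega
      -- branch 4
      have e4 : ((PySem.List.enumerate (PySem.List.slice s none (some (-1))) 0).all
          (fun px => pvIdxInc px.2 - pvIdxInc ((PySem.List.pyGet? s (px.1 + 1)).getD ' ') == -1))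
          = PySem.Chars.isIn s "1234567890".toList := by
        apply Bool.coe_iff_coe.mp
        refine (pv_allA_iff s pvIdxInc).trans ?_
        refine (pv_run_iff_infix "1234567890".toList (by decide) pvIdxInc s hne ?_ ?_).trans
          (PySem.Chars.isIn_iff_infix s _).symm
        · intro c hc; obtain ⟨k, hk, rfl⟩ := hdig c hc; exact (pv_digit_mem_strs k hk).1
        · intro c hc; obtain ⟨k, hk, rfl⟩ := hdig c hc; exact pv_idxInc_digit k hk
      -- branch 5
      have e5 : ((PySem.List.enumerate (PySem.List.slice s none (some (-1))) 0).all
          (fun px => pvIdxDec px.2 - pvIdxDec ((PySem.List.pyGet? s (px.1 + 1)).getD ' ') == -1))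
          = PySem.Chars.isIn s "9876543210".toList := by
        apply Bool.coe_iff_coe.mp
        refine (pv_allA_iff s pvIdxDec).trans ?_
        refine (pv_run_iff_infix "9876543210".toList (by decide) pvIdxDec s hne ?_ ?_).trans
          (PySem.Chars.isIn_iff_infix s _).symm
        · intro c hc; obtain ⟨k, hk, rfl⟩ := hdig c hc; exact (pv_digit_mem_strs k hk).2
        · intro c hc; obtain ⟨k, hk, rfl⟩ := hdig c hc; exact pv_idxDec_digit k hk
      -- branch 6
      have e6 : (((PySem.List.slice? (PySem.List.slice s none (some (PySem.Int.floordiv (s.length : Int) 2))) none none (-1)).getD [])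
          == PySem.List.slice s (some (-(PySem.Int.floordiv (s.length : Int) 2))) none)
          = (s == s.reverse) := by
        rw [pv_floordiv_two, pv_slice_take, PySem.List.slice?_none_none_neg_one,
            pv_slice_from_neg s (s.length / 2) (by omega) (by omega)]
        apply Bool.coe_iff_coe.mp
        rw [Option.getD_some, beq_iff_eq, beq_iff_eq]
        exact pv_pal_iff s
      have hA : (2:Int) < (s.length : Int) := by omega
      have hB : ¬ ((s.length : Int) ≤ 2) := by omega
      rw [if_pos hA, if_neg hB]
      rw [e2, e4, e5, e6]
      cases aw.contains m <;>
      cases (PySem.Int.mod m ((10 : Int) ^ (s.length - 1)) == 0) <;>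
      cases ((PySem.Set.ofList s).length == 1) <;>
      cases (PySem.Chars.isIn s "1234567890".toList) <;>
      cases (PySem.Chars.isIn s "9876543210".toList) <;>
      cases (s == s.reverse) <;> simp

-- ===== VERDICT (by name: the statement is the Claim_ definition above) =====
theorem is_interesting_spec : Claim_equal_is_interesting := by
  intro number aw hdom hpre
  unfold Spec_is_interesting is_interesting is_interesting_alt
  have hrange : PySem.List.pyRange 0 3 1 = [0, 1, 2] := by decide
  rw [hrange]
  simp only [List.findSome?_cons, List.findSome?_nil]
  by_cases hp : -9 ≤ number
  · have e0 := pv_aIter_eq aw number 0 (by omega)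
    have e1 := pv_aIter_eq aw number 1 (by omega)
    have e2 := pv_aIter_eq aw number 2 (by omega)
    rw [add_zero] at e0
    rw [e0, e1, e2]
    cases pvInteresting aw number <;>
    cases pvInteresting aw (number + 1) <;>
    cases pvInteresting aw (number + 2) <;> simp
  · have hmem : number ∈ aw := hpre.resolve_left hp
    have hcont : aw.contains number = true := List.contains_iff_mem.mpr hmem
    have hlen : 3 ≤ (PySem.Int.toChars number).length := by
      have h2 : ¬ (Nat.toDigits 10 number.natAbs).length ≤ 1 := by
        rw [pv_len_le_one_iff]; omega
      simp only [PySem.Int.toChars, if_pos (show number < 0 by omega), List.length_cons]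
      omega
    have e0 : pvAIter aw number 0 = some 2 := by
      unfold pvAIter
      simp only [add_zero]
      rw [if_pos (show (2:Int) < ((PySem.Int.toChars number).length : Int) by omega), if_pos hcont]
      simp
    have eB : pvInteresting aw number = true := by
      unfold pvInteresting
      simp only []
      rw [if_neg (show ¬ ((((PySem.Int.toChars number).length) : Int) ≤ 2) by omega)]
      simp [hmem]
    rw [e0, eB]
    simp
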